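-- pv_equiv track=rewrite | github.com/rafaelmikayelyan/dcp | vh/vh-test-python-1-csv-sort.py | sort_csv_columns
-- ===== SOURCE A (Python) =====
-- def sort_csv_columns(csv_data: str) -> str:
--     lines = csv_data.splitlines()
--     output = ''
--     list_of_strings = []
--
--     for i in lines:
--       list_of_strings.append(i.split(','))
--
--     col_length = len(list_of_strings)
--     row_length = len(list_of_strings[0])
--
--     if row_length < 2:
--       return csv_data
--
--     sequence = sorted((name.lower(), index) for index, name in enumerate(list_of_strings[0]))
--
--     for i in range(col_length):
--       output += add_in_sequence(sequence, list_of_strings[i], row_length, i == 0)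
--
--     return output
--
-- def add_in_sequence(sequence: tuple, line: list, row_length: int, first_row: bool) -> str:
--     string = ''
--
--     if not first_row:
--       string += '\n'
--
--     for i in range(row_length):
--       string += line[sequence[i][1]]
--
--       if i < row_length - 1:
--         string += ','
--
--     return string
-- ===== SOURCE B (Python) =====
-- def sort_csv_columns(csv_data: str) -> str:
--     rows = [line.split(',') for line in csv_data.splitlines()]
--     if len(rows[0]) < 2:
--         return csv_data
--     cols = [[row[j] for row in rows] for j in range(len(rows[0]))]
--     cols.sort(key=lambda col: col[0].lower())
--     return '\n'.join(','.join(col[r] for col in cols) for r in range(len(rows)))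
-- ===== Notes on version B (the rewrite author's own statement) =====
-- stated objective: alternative
-- what changed: B switches to a column-major representation: it transposes the parsed rows into a list of column lists, stably sorts the columns themselves by their lowercased header cell, and re-transposes with joins, instead of A's sorting of (lowercased-header, index) tuples and cell-by-cell positional output accumulation through a helper.
import Mathlib
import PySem

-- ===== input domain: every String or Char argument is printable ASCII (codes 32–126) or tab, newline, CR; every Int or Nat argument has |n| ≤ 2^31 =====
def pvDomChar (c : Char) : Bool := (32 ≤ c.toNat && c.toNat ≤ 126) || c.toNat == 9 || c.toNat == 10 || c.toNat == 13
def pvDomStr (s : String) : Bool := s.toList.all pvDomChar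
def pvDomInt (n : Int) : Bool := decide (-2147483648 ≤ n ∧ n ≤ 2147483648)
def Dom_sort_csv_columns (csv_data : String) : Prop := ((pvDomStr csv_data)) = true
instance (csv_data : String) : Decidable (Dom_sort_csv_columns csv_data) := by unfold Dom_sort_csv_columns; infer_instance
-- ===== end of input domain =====

-- B re-implements the task column-major: it transposes the parsed rows into column lists,
-- stably sorts the columns themselves by their lowercased header cell, and re-transposes
-- with joins, instead of A's (lower, index)-tuple sort and cell-by-cell string accumulation;
-- objective: alternative (different data structure, similar cost).


-- shared primitive wrapper: s.split(',') — the separator "," is non-empty, so split? is always `some`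
def pvSplitComma (s : String) : List String := (PySem.Str.split? s ",").getD []

-- ===== PORT A =====
-- line[sequence[i][1]] / sequence[i]: in-range inside Pre_ (Pre_ excludes the short rows on
-- which Python raises IndexError), so pyGetD's defaults are never observed inside Pre_.
def add_in_sequence (sequence : List (String × Int)) (line : List String) (row_length : Int) (first_row : Bool) : String :=
  let string := ""
  let string := if !first_row then string ++ "\n" else string
  (PySem.List.pyRange 0 row_length).foldl (fun string i =>
    let string := string ++ PySem.List.pyGetD line (PySem.List.pyGetD sequence i ("", 0)).2 ""
    if i < row_length - 1 then string ++ "," else string) string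

-- list_of_strings[0] raises IndexError on empty input in Python; Pre_ excludes that input.
def sort_csv_columns (csv_data : String) : String :=
  let lines := PySem.Str.splitlines csv_data
  let list_of_strings := lines.foldl (fun acc i => acc ++ [pvSplitComma i]) []
  let col_length : Int := PySem.List.len list_of_strings
  let row_length : Int := PySem.List.len (PySem.List.pyGetD list_of_strings 0 [])
  if row_length < 2 then csv_data
  else
    let sequence := PySem.List.sorted2
      ((PySem.List.enumerate (PySem.List.pyGetD list_of_strings 0 [])).map
        (fun p => (PySem.Str.lower p.2, p.1))) (fun t => t.1) (fun t => t.2)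
    (PySem.List.pyRange 0 col_length).foldl (fun output i =>
      output ++ add_in_sequence sequence (PySem.List.pyGetD list_of_strings i []) row_length (i == 0)) ""

-- ===== PORT B =====
-- rows[0] / row[j] / col[0]: in-range inside Pre_ (same IndexError set as A: the empty
-- string and rows shorter than the header), so pyGetD's defaults are never observed there.
def sort_csv_columns_alt (csv_data : String) : String :=
  let rows := (PySem.Str.splitlines csv_data).map (fun line => pvSplitComma line)
  if PySem.List.len (PySem.List.pyGetD rows 0 []) < 2 then csv_data
  else
    let cols := (PySem.List.pyRange 0 (PySem.List.len (PySem.List.pyGetD rows 0 []))).map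
      (fun j => rows.map (fun row => PySem.List.pyGetD row j ""))
    let cols := PySem.List.sorted cols
      (fun col => PySem.Str.lower (PySem.List.pyGetD col 0 ""))
    PySem.Str.join "\n" ((PySem.List.pyRange 0 (PySem.List.len rows)).map (fun r =>
      PySem.Str.join "," (cols.map (fun col => PySem.List.pyGetD col r ""))))

-- ===== PRECONDITION & SPEC =====
-- Pre_ excludes exactly the inputs where Python A raises IndexError: the empty string
-- (no lines, so list_of_strings[0] fails) and, when the header has ≥ 2 columns, any row
-- shorter than the header (line[sequence[i][1]] fails). B raises there too.
def Pre_sort_csv_columns (csv_data : String) : Prop :=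
  let rows := (PySem.Str.splitlines csv_data).map pvSplitComma
  rows ≠ [] ∧ ((rows.headD []).length < 2 ∨ ∀ r ∈ rows, (rows.headD []).length ≤ r.length)
instance (csv_data : String) : Decidable (Pre_sort_csv_columns csv_data) := by
  unfold Pre_sort_csv_columns; infer_instance

def pvWitness_sort_csv_columns : String := "b,a\n1,2"

def Spec_sort_csv_columns (csv_data : String) (out : String) : Prop := out = sort_csv_columns_alt csv_data
instance (csv_data : String) (out : String) : Decidable (Spec_sort_csv_columns csv_data out) := by unfold Spec_sort_csv_columns; infer_instance

-- ===== CLAIM (what is proved, stated in full; the proofs are below) =====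
def Claim_equal_sort_csv_columns : Prop := ∀ (csv_data : String), Dom_sort_csv_columns csv_data → Pre_sort_csv_columns csv_data → Spec_sort_csv_columns csv_data (sort_csv_columns csv_data)

-- ===== LEMMAS AND PROOFS =====

-- proof-only abbreviations: the key on column indices and the sorted index list both ports realise
def pvKey (hdr : List String) : Int → String := fun j => PySem.Str.lower (PySem.List.pyGetD hdr j "")
def pvOrder (hdr : List String) : List Int :=
  PySem.List.sorted (PySem.List.pyRange 0 (PySem.List.len hdr)) (pvKey hdr)

-- insertBy commutes with map when the comparisons correspond
lemma insertBy_map {α β : Type} (f : α → β) (bA : β → β → Bool) (bB : α → α → Bool)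
    (h : ∀ a b, bA (f a) (f b) = bB a b) (x : α) (acc : List α) :
    PySem.List.insertBy bA (f x) (acc.map f) = (PySem.List.insertBy bB x acc).map f := by
  induction acc with
  | nil => simp [PySem.List.insertBy]
  | cons y ys ih => simp [PySem.List.insertBy, h]; split_ifs <;> simp [ih]

lemma foldl_insertBy_map {α β : Type} (f : α → β) (bA : β → β → Bool) (bB : α → α → Bool)
    (h : ∀ a b, bA (f a) (f b) = bB a b) (xs : List α) (acc : List α) :
    List.foldl (fun acc x => PySem.List.insertBy bA x acc) (acc.map f) (xs.map f)
      = (List.foldl (fun acc x => PySem.List.insertBy bB x acc) acc xs).map f := by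
  induction xs generalizing acc with
  | nil => rfl
  | cons x xs ih => simpa [insertBy_map f bA bB h] using ih (PySem.List.insertBy bB x acc)

-- insertBy only compares the inserted element with members of the accumulator
lemma insertBy_congr {α : Type} (b1 b2 : α → α → Bool) (x : α) (acc : List α)
    (h : ∀ y ∈ acc, b1 x y = b2 x y) :
    PySem.List.insertBy b1 x acc = PySem.List.insertBy b2 x acc := by
  induction acc with
  | nil => rfl
  | cons y ys ih =>
    simp [PySem.List.insertBy, h y (by simp)]
    split_ifs <;> simp [ih (fun z hz => h z (by simp [hz]))]

-- on a strictly increasing input every comparison is "new element vs smaller element",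
-- so two predicates agreeing there give the same insertion sort
lemma foldl_insertBy_lt_congr (b1 b2 : Int → Int → Bool)
    (h : ∀ x y : Int, y < x → b1 x y = b2 x y) :
    ∀ (xs : List Int) (acc : List Int), xs.Pairwise (· < ·) → (∀ y ∈ acc, ∀ x ∈ xs, y < x) →
    List.foldl (fun acc x => PySem.List.insertBy b1 x acc) acc xs
      = List.foldl (fun acc x => PySem.List.insertBy b2 x acc) acc xs := by
  intro xs
  induction xs with
  | nil => intro acc _ _; rfl
  | cons x xs ih =>
    intro acc hp hacc
    have hx : ∀ y ∈ acc, y < x := fun y hy => hacc y hy x (by simp)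
    have h1 : PySem.List.insertBy b1 x acc = PySem.List.insertBy b2 x acc :=
      insertBy_congr b1 b2 x acc (fun y hy => h x y (hx y hy))
    simp only [List.foldl_cons, h1]
    apply ih
    · exact hp.of_cons
    · intro y hy z hz
      rcases (PySem.List.mem_insertBy b2 x y acc).mp hy with rfl | hy
      · exact (List.pairwise_cons.mp hp).1 z hz
      · exact hacc y hy z (by simp [hz])

lemma len_eq_natCast {α : Type} (xs : List α) : PySem.List.len xs = ((xs.length : Nat) : Int) := by
  simp [PySem.List.len]

-- the strictly increasing index list
lemma pairwise_pyRange_len {α : Type} (xs : List α) :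
    (PySem.List.pyRange 0 (PySem.List.len xs)).Pairwise (· < ·) := by
  rw [len_eq_natCast, PySem.List.pyRange_zero_natCast]
  exact List.pairwise_lt_range.map _ (by intro a b hab; exact_mod_cast hab)

-- A's sorted (lower, index) tuples are the sorted index list pvOrder, tagged with their keys
lemma sequence_eq_order (hdr : List String) :
    PySem.List.sorted2
      ((PySem.List.enumerate hdr).map (fun p => (PySem.Str.lower p.2, p.1)))
      (fun t => t.1) (fun t => t.2)
    = (pvOrder hdr).map (fun j => (pvKey hdr j, j)) := by
  have hpairs : (PySem.List.enumerate hdr).map (fun p => (PySem.Str.lower p.2, p.1))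
      = (PySem.List.pyRange 0 (PySem.List.len hdr)).map (fun j => (pvKey hdr j, j)) := by
    rw [PySem.List.enumerate_eq_map_pyRange hdr ""]
    simp [List.map_map, Function.comp, pvKey]
  rw [hpairs]
  unfold PySem.List.sorted2 pvOrder PySem.List.sorted
  simp only [if_neg (by decide : ¬ (false = true))]
  have hmap := foldl_insertBy_map (fun j : Int => (pvKey hdr j, j))
    (fun a b : String × Int => decide (a.1 < b.1) || !decide (b.1 < a.1) && decide (a.2 < b.2))
    (fun j k : Int => decide (pvKey hdr j < pvKey hdr k)
        || !decide (pvKey hdr k < pvKey hdr j) && decide (j < k))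
    (fun a b => rfl) (PySem.List.pyRange 0 (PySem.List.len hdr)) []
  rw [show ([] : List (String × Int)) = List.map (fun j : Int => (pvKey hdr j, j)) [] from rfl,
    hmap]
  congr 1
  apply foldl_insertBy_lt_congr
  · intro x y hyx
    have hxy : decide (x < y) = false := by simp; omega
    simp [hxy]
  · exact pairwise_pyRange_len hdr
  · intro y hy; simp at hy

-- generic join facts at the String level
lemma str_join_nil (sep : String) : PySem.Str.join sep [] = "" := by
  apply String.toList_inj.mp
  simp [PySem.Str.toList_join, PySem.Chars.join_nil]

lemma str_join_singleton (sep p : String) : PySem.Str.join sep [p] = p := by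
  apply String.toList_inj.mp
  simp [PySem.Str.toList_join, PySem.Chars.join_singleton]

lemma str_join_cons_cons (sep p q : String) (rest : List String) :
    PySem.Str.join sep (p :: q :: rest) = p ++ sep ++ PySem.Str.join sep (q :: rest) := by
  apply String.toList_inj.mp
  simp [PySem.Str.toList_join, PySem.Chars.join_cons_cons, String.toList_append]

-- hoisting the accumulator of the cell-and-comma fold
lemma joinFold_hoist (ds : List String) : ∀ (init : String),
    List.foldl (fun s d => s ++ d ++ ",") init ds
      = init ++ List.foldl (fun s d => s ++ d ++ ",") "" ds := by
  induction ds with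
  | nil => intro init; simp [String.append_empty]
  | cons d ds ih =>
    intro init
    simp only [List.foldl_cons]
    rw [ih (init ++ d ++ ","), ih ("" ++ d ++ ",")]
    simp [String.empty_append, String.append_assoc]

lemma str_join_snoc (ds : List String) (c : String) :
    PySem.Str.join "," (ds ++ [c]) = List.foldl (fun s d => s ++ d ++ ",") "" ds ++ c := by
  induction ds with
  | nil => simp [str_join_singleton, String.empty_append]
  | cons d ds ih =>
    rcases ds with _ | ⟨e, es⟩
    · simp only [List.nil_append, List.cons_append, str_join_cons_cons, str_join_singleton]
      simp [String.empty_append, String.append_assoc]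
    · simp only [List.cons_append] at ih ⊢
      rw [str_join_cons_cons, ih]
      simp only [List.foldl_cons]
      rw [joinFold_hoist es ("" ++ e ++ ","), joinFold_hoist es ("" ++ d ++ "," ++ e ++ ",")]
      simp [String.empty_append, String.append_assoc]

-- the value of A's inner loop: the cells with commas between, appended to init
lemma joinFold (cells : List String) : ∀ (init : String),
    (PySem.List.pyRange 0 (PySem.List.len cells)).foldl (fun s i =>
        (fun s' => if i < PySem.List.len cells - 1 then s' ++ "," else s')
          (s ++ PySem.List.pyGetD cells i "")) init
      = init ++ PySem.Str.join "," cells := by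
  induction cells using List.reverseRecOn with
  | nil =>
    intro init
    have h : PySem.List.pyRange 0 (PySem.List.len ([] : List String)) = [] := rfl
    simp [str_join_nil, String.append_empty]
  | append_singleton ds c _ih =>
    intro init
    have hlen2 : PySem.List.len (ds ++ [c]) = ((ds.length + 1 : Nat) : Int) := by
      rw [len_eq_natCast]; simp
    rw [hlen2, PySem.List.pyRange_zero_natCast, List.foldl_map, List.range_succ,
      List.foldl_append, List.foldl_cons, List.foldl_nil]
    have hinner : List.foldl (fun (s : String) (k : Nat) =>
          if (k : Int) < ((ds.length + 1 : Nat) : Int) - 1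
          then s ++ PySem.List.pyGetD (ds ++ [c]) (k : Int) "" ++ ","
          else s ++ PySem.List.pyGetD (ds ++ [c]) (k : Int) "") init (List.range ds.length)
        = List.foldl (fun s d => s ++ d ++ ",") init ds := by
      rw [PySem.List.foldl_congr_mem (List.range ds.length) _
        (fun (s : String) (k : Nat) => s ++ PySem.List.pyGetD ds (k : Int) "" ++ ",") init ?_]
      · have h := PySem.List.foldl_pyRange_pyGetD ds "" (fun s d => s ++ d ++ ",") init
          (a := 0) le_rfl
        rw [len_eq_natCast, PySem.List.pyRange_zero_natCast, List.foldl_map] at h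
        simpa using h
      · intro acc k hk
        rw [List.mem_range] at hk
        have hcond : ((k : Int) < ((ds.length + 1 : Nat) : Int) - 1) := by push_cast; omega
        rw [if_pos hcond]
        have h1 : PySem.List.pyGetD (ds ++ [c]) (k : Int) ""
            = PySem.List.pyGetD ds (k : Int) "" := by
          rw [PySem.List.pyGetD_eq_getElem _ _ (by positivity) (by simp; omega),
            PySem.List.pyGetD_eq_getElem _ _ (by positivity) (by exact_mod_cast hk)]
          simp [hk]
        rw [h1]
    rw [hinner]
    have hcond2 : ¬ ((ds.length : Int) < ((ds.length + 1 : Nat) : Int) - 1) := by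
      push_cast; omega
    simp only [if_neg hcond2]
    have hlast : PySem.List.pyGetD (ds ++ [c]) (ds.length : Int) "" = c := by
      rw [PySem.List.pyGetD_eq_getElem _ _ (by positivity) (by simp)]
      simp
    rw [hlast, str_join_snoc, joinFold_hoist, String.append_assoc]

-- A's add_in_sequence on the sorted tuples equals the reordered-row join (with row prefix)
lemma row_eq (hdr row : List String) (first : Bool) :
    add_in_sequence
      (PySem.List.sorted2 ((PySem.List.enumerate hdr).map (fun p => (PySem.Str.lower p.2, p.1)))
        (fun t => t.1) (fun t => t.2))
      row (PySem.List.len hdr) first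
    = (if first then "" else "\n")
        ++ PySem.Str.join "," ((pvOrder hdr).map (fun j => PySem.List.pyGetD row j "")) := by
  simp only [add_in_sequence, sequence_eq_order]
  have horder_len : (pvOrder hdr).length = hdr.length := by
    simp [pvOrder, PySem.List.length_sorted]
  set cells := (pvOrder hdr).map (fun j => PySem.List.pyGetD row j "") with hcells
  have hlen : PySem.List.len cells = PySem.List.len hdr := by
    simp [hcells, horder_len]
  rw [← hlen]
  have hbody : ∀ (acc : String), ∀ i ∈ PySem.List.pyRange 0 (PySem.List.len cells),
      (fun s' => if i < PySem.List.len cells - 1 then s' ++ "," else s')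
        (acc ++ PySem.List.pyGetD row
          (PySem.List.pyGetD ((pvOrder hdr).map (fun j => (pvKey hdr j, j))) i ("", 0)).2 "")
      = (fun s' => if i < PySem.List.len cells - 1 then s' ++ "," else s')
        (acc ++ PySem.List.pyGetD cells i "") := by
    intro acc i hi
    rw [PySem.List.mem_pyRange_one] at hi
    have hi1 : (0 : Int) ≤ i := hi.1
    have hi2 : i < ((cells.length : Nat) : Int) := by rw [← len_eq_natCast]; exact hi.2
    have hi2' : i < (((pvOrder hdr).map (fun j => (pvKey hdr j, j))).length : Int) := by
      simpa [hcells] using hi2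
    rw [PySem.List.pyGetD_eq_getElem _ _ hi1 hi2', PySem.List.pyGetD_eq_getElem _ _ hi1 hi2]
    simp [hcells]
  rw [PySem.List.foldl_congr_mem _ _ _ _ hbody, joinFold]
  cases first <;> simp [String.empty_append]

-- joining the per-row strings with '\n' prefixes
lemma joinNL (g : List String → String) :
    ∀ (rs : List (List String)) (r0 : List String) (pre : String),
    List.foldl (fun out row => out ++ ("\n" ++ g row)) (pre ++ g r0) rs
      = pre ++ PySem.Str.join "\n" ((r0 :: rs).map g) := by
  intro rs
  induction rs with
  | nil => intro r0 pre; simp [str_join_singleton]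
  | cons r rs ih =>
    intro r0 pre
    simp only [List.foldl_cons]
    have hassoc : (pre ++ g r0) ++ ("\n" ++ g r) = (pre ++ g r0 ++ "\n") ++ g r := by
      simp [String.append_assoc]
    rw [hassoc, ih r (pre ++ g r0 ++ "\n")]
    simp only [List.map_cons]
    rw [str_join_cons_cons]
    simp [String.append_assoc]

-- A's program on the already-parsed row matrix equals the row-major reordered-join form
-- (csv is the value of the "< 2 columns" branch)
lemma main_case (csv : String) (rows : List (List String)) :
    (if PySem.List.len (PySem.List.pyGetD rows 0 []) < 2 then csv
     else List.foldl (fun output i => output ++ add_in_sequence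
        (PySem.List.sorted2 ((PySem.List.enumerate (PySem.List.pyGetD rows 0 [])).map
          (fun p => (PySem.Str.lower p.2, p.1))) (fun t => t.1) (fun t => t.2))
        (PySem.List.pyGetD rows i []) (PySem.List.len (PySem.List.pyGetD rows 0 [])) (i == 0))
        "" (PySem.List.pyRange 0 (PySem.List.len rows)))
    = (if PySem.List.len (PySem.List.pyGetD rows 0 []) < 2 then csv
       else PySem.Str.join "\n" (rows.map (fun row => PySem.Str.join ","
        ((pvOrder (PySem.List.pyGetD rows 0 [])).map (fun j => PySem.List.pyGetD row j ""))))) := by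
  split_ifs with h
  · rfl
  · rcases rows with _ | ⟨r0, rs⟩
    · exact absurd (by norm_num [PySem.List.pyGetD, PySem.List.pyIdx?, PySem.List.len]) h
    · have h0 : PySem.List.pyGetD (r0 :: rs) 0 [] = r0 := by
        rw [PySem.List.pyGetD_eq_getElem _ _ le_rfl (by exact_mod_cast Nat.succ_pos rs.length)]
        simp
      rw [h0]
      set g : List String → String :=
        fun row => PySem.Str.join "," ((pvOrder r0).map (fun j => PySem.List.pyGetD row j ""))
        with hg
      have hpos : (0 : Int) < PySem.List.len (r0 :: rs) := by
        rw [len_eq_natCast]; exact_mod_cast Nat.succ_pos rs.length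
      rw [PySem.List.pyRange_one_cons hpos, List.foldl_cons]
      have hfirst : "" ++ add_in_sequence
          (PySem.List.sorted2 ((PySem.List.enumerate r0).map
            (fun p => (PySem.Str.lower p.2, p.1))) (fun t => t.1) (fun t => t.2))
          (PySem.List.pyGetD (r0 :: rs) 0 []) (PySem.List.len r0) ((0 : Int) == 0)
          = g r0 := by
        rw [h0, show ((0 : Int) == 0) = true from rfl, row_eq]
        simp [hg, String.empty_append]
      rw [hfirst]
      have hrest : ∀ (acc : String), ∀ i ∈ PySem.List.pyRange (0 + 1) (PySem.List.len (r0 :: rs)),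
          acc ++ add_in_sequence
            (PySem.List.sorted2 ((PySem.List.enumerate r0).map
              (fun p => (PySem.Str.lower p.2, p.1))) (fun t => t.1) (fun t => t.2))
            (PySem.List.pyGetD (r0 :: rs) i []) (PySem.List.len r0) (i == 0)
          = acc ++ ("\n" ++ g (PySem.List.pyGetD (r0 :: rs) i [])) := by
        intro acc i hi
        rw [PySem.List.mem_pyRange_one] at hi
        have hz : (i == 0) = false := by
          simp only [beq_eq_false_iff_ne, ne_eq]
          omega
        rw [hz, row_eq]
        simp [hg]
      rw [PySem.List.foldl_congr_mem _ _ _ _ hrest]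
      have hfold := PySem.List.foldl_pyRange_pyGetD (r0 :: rs) []
        (fun out row => out ++ ("\n" ++ g row)) (g r0) (a := 1) (by norm_num)
      simp only [] at hfold
      rw [show ((0 : Int) + 1) = 1 from rfl]
      rw [hfold]
      have hdrop : List.drop (1 : Int).toNat (r0 :: rs) = rs := rfl
      rw [hdrop, show g r0 = "" ++ g r0 from String.empty_append.symm,
        joinNL g rs r0 "", String.empty_append]

-- B's column-major program on the parsed row matrix equals the same row-major reordered-join form
lemma alt_case (csv : String) (rows : List (List String)) :
    (if PySem.List.len (PySem.List.pyGetD rows 0 []) < 2 then csv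
     else PySem.Str.join "\n" ((PySem.List.pyRange 0 (PySem.List.len rows)).map (fun r =>
       PySem.Str.join "," ((PySem.List.sorted
         ((PySem.List.pyRange 0 (PySem.List.len (PySem.List.pyGetD rows 0 []))).map
           (fun j => rows.map (fun row => PySem.List.pyGetD row j "")))
         (fun col => PySem.Str.lower (PySem.List.pyGetD col 0 ""))).map
         (fun col => PySem.List.pyGetD col r "")))))
    = (if PySem.List.len (PySem.List.pyGetD rows 0 []) < 2 then csv
       else PySem.Str.join "\n" (rows.map (fun row => PySem.Str.join ","
        ((pvOrder (PySem.List.pyGetD rows 0 [])).map (fun j => PySem.List.pyGetD row j ""))))) := by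
  split_ifs with h
  · rfl
  · rcases rows with _ | ⟨r0, rs⟩
    · exact absurd (by norm_num [PySem.List.pyGetD, PySem.List.pyIdx?, PySem.List.len]) h
    · have h0 : PySem.List.pyGetD (r0 :: rs) 0 [] = r0 := by
        rw [PySem.List.pyGetD_eq_getElem _ _ le_rfl (by exact_mod_cast Nat.succ_pos rs.length)]
        simp
      rw [h0]
      -- the sorted column list is the column builder mapped over the sorted index list
      have hkey : ∀ j : Int,
          PySem.Str.lower (PySem.List.pyGetD ((r0 :: rs).map
            (fun row => PySem.List.pyGetD row j "")) 0 "")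
          = pvKey r0 j := by
        intro j
        have : PySem.List.pyGetD ((r0 :: rs).map (fun row => PySem.List.pyGetD row j "")) 0 ""
            = PySem.List.pyGetD r0 j "" := by
          rw [PySem.List.pyGetD_eq_getElem _ _ le_rfl (by simp)]
          simp
        rw [this]; rfl
      have hsorted : PySem.List.sorted
          ((PySem.List.pyRange 0 (PySem.List.len r0)).map
            (fun j => (r0 :: rs).map (fun row => PySem.List.pyGetD row j "")))
          (fun col => PySem.Str.lower (PySem.List.pyGetD col 0 ""))
          = (pvOrder r0).map (fun j => (r0 :: rs).map (fun row => PySem.List.pyGetD row j "")) := by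
        unfold pvOrder PySem.List.sorted
        simp only [if_neg (by decide : ¬ (false = true))]
        have hmap := foldl_insertBy_map
          (fun j : Int => (r0 :: rs).map (fun row => PySem.List.pyGetD row j ""))
          (fun c d : List String => decide (PySem.Str.lower (PySem.List.pyGetD c 0 "")
            < PySem.Str.lower (PySem.List.pyGetD d 0 "")))
          (fun j k : Int => decide (pvKey r0 j < pvKey r0 k))
          (fun a b => by simp only [hkey])
          (PySem.List.pyRange 0 (PySem.List.len r0)) []
        rw [show ([] : List (List String))
            = List.map (fun j : Int => (r0 :: rs).map (fun row => PySem.List.pyGetD row j "")) []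
          from rfl, hmap]
      rw [hsorted]
      congr 1
      -- re-transposition: reading row r of the reordered columns is reordering row r
      have hrow : ∀ r ∈ PySem.List.pyRange 0 (PySem.List.len (r0 :: rs)),
          PySem.Str.join "," (((pvOrder r0).map
            (fun j => (r0 :: rs).map (fun row => PySem.List.pyGetD row j ""))).map
            (fun col => PySem.List.pyGetD col r ""))
          = PySem.Str.join "," ((pvOrder r0).map
              (fun j => PySem.List.pyGetD (PySem.List.pyGetD (r0 :: rs) r []) j "")) := by
        intro r hr
        rw [PySem.List.mem_pyRange_one] at hr
        have hr2 : r < (((r0 :: rs).length : Nat) : Int) := by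
          rw [← len_eq_natCast]; exact hr.2
        congr 1
        rw [List.map_map]
        apply List.map_congr_left
        intro j _
        simp only [Function.comp]
        rw [PySem.List.pyGetD_eq_getElem _ _ hr.1 (by simpa using hr2),
          PySem.List.pyGetD_eq_getElem _ _ hr.1 hr2]
        simp only [List.getElem_map]
      rw [List.map_congr_left hrow]
      -- iterating r over range(len rows) and indexing is mapping over rows
      rw [len_eq_natCast, PySem.List.pyRange_zero_natCast, List.map_map]
      apply List.ext_getElem (by simp)
      intro i hi1 hi2
      simp only [List.getElem_map, List.getElem_range, Function.comp]
      rw [PySem.List.pyGetD_eq_getElem _ _ (by positivity)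
        (by simp at hi2 ⊢; exact_mod_cast hi2)]
      simp

-- ===== VERDICT (by name: the statement is the Claim_ definition above) =====
theorem sort_csv_columns_spec : Claim_equal_sort_csv_columns := by
  intro csv hdom hpre
  unfold Spec_sort_csv_columns
  simp only [sort_csv_columns, sort_csv_columns_alt,
    PySem.List.foldl_append_singleton_eq_map, List.nil_append]
  rw [main_case csv ((PySem.Str.splitlines csv).map (fun line => pvSplitComma line)),
    ← alt_case csv ((PySem.Str.splitlines csv).map (fun line => pvSplitComma line))]
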